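-- pv_equiv track=rewrite | github.com/sigurdvaa/adventofcode | 2016/11-radioisotope-thermoelectric-generators.py | get_valid_states
-- ===== SOURCE A (Python) =====
-- def valid_state(state):
--     for floor in state:
--         microchips = []
--         generators = []
--         for item in floor:
--             if item[-1] == "M":
--                 microchips += [item]
--             elif item[-1] == "G":
--                 generators += [item]
--         if len(generators) > 0:
--             for m in microchips:
--                 shielded = False
--                 for g in generators:
--                     if m[:2] == g[:2]:
--                         shielded = True
--                         break
--                 if not shielded:
--                     return False
--     return True
--
-- def get_valid_states(states):
--     i = 0
--     while i < len(states):
--         if not valid_state(states[i]):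
--             del states[i]
--         else:
--             i += 1
--     return states
-- ===== SOURCE B (Python) =====
-- def valid_state(state):
--     for floor in state:
--         any_gen = False
--         cur = None
--         cur_gen = False
--         bad = False
--         for item in sorted(floor, key=lambda it: (it[:2], it[-1])):
--             p = item[:2]
--             if p != cur:
--                 cur = p
--                 cur_gen = False
--             t = item[-1]
--             if t == "G":
--                 cur_gen = True
--                 any_gen = True
--             elif t == "M" and not cur_gen:
--                 bad = True
--         if any_gen and bad:
--             return False
--     return True
--
-- def get_valid_states(states):
--     states[:] = [s for s in states if valid_state(s)]
--     return states
-- ===== Notes on version B (the rewrite author's own statement) =====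
-- stated objective: alternative
-- what changed: valid_state now sorts each floor by the key (item[:2], item[-1]) so that items of one element are adjacent with the generator before the microchip, and finds unshielded chips in one linear scan with a current-group-has-generator flag instead of A's nested chip-by-generator scans; the in-place while/del loop becomes a single filtering pass assigned back via slice assignment.
-- outside the precondition, e.g. on get_valid_states([[['HM', 'LG'], ['']]]): A returns [], B returns []; on get_valid_states([[['']]]): A raises IndexError, B raises IndexError
import Mathlib
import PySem

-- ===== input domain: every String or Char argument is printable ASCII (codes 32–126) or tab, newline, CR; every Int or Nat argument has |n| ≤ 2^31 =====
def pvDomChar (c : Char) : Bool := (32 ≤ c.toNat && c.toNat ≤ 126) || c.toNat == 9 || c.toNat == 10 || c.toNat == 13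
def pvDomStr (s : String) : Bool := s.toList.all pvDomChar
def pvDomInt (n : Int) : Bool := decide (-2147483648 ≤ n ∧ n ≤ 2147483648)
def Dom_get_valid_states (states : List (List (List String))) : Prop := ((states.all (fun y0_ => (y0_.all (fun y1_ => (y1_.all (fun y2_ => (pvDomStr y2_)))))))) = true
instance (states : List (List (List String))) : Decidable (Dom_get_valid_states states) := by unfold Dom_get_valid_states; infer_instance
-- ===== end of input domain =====

-- B's valid_state sorts each floor by the key (item[:2], item[-1]) — grouping a floor by element
-- prefix, generators before microchips within a group — and replaces A's nested chip×generator
-- scans by one linear scan of the sorted floor with a current-group-has-generator flag; the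
-- in-place while/del loop of get_valid_states becomes a single filtering pass (objective:
-- alternative).  Python A and B both mutate `states` in place; the theorems are about the
-- returned value (equal to the final contents in both).

-- ===== PORT A =====
-- item[-1] == "M" / item[-1] == "G" / item[:2] (shared vocabulary of both ports)
def isM (item : String) : Bool := PySem.Str.pyGet? item (-1) == some 'M'
def isG (item : String) : Bool := PySem.Str.pyGet? item (-1) == some 'G'
def pvPrefix2 (s : String) : String := PySem.Str.slice s none (some 2)

def valid_state_a : List (List String) → Bool
  | [] => true
  | floor :: rest =>
      -- build microchips / generators lists by appending, as A's inner for-loop does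
      let mg := floor.foldl (fun (acc : List String × List String) item =>
          if isM item then (acc.1 ++ [item], acc.2)
          else if isG item then (acc.1, acc.2 ++ [item])
          else acc) (([] : List String), ([] : List String))
      if mg.2.length > 0 then
        -- for m in microchips: shielded flag set by the generator scan with early break (= any)
        if mg.1.all (fun m => mg.2.any (fun g => pvPrefix2 m == pvPrefix2 g)) then
          valid_state_a rest
        else false
      else valid_state_a rest

-- the while-loop with del: scan left to right, kept elements accumulate before index i
def gvs_loop (kept : List (List (List String))) : List (List (List String)) → List (List (List String))
  | [] => kept
  | s :: rest => if !valid_state_a s then gvs_loop kept rest else gvs_loop (kept ++ [s]) rest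

def get_valid_states (states : List (List (List String))) : List (List (List String)) :=
  gvs_loop [] states

-- ===== PORT B =====
-- item[-1] as a character; the ' ' default is only reached on an empty item, outside Pre_
def lastCh (item : String) : Char := (PySem.Str.pyGet? item (-1)).getD ' '

-- one step of B's scan over the sorted floor; state = (cur, cur_gen, any_gen, bad)
def scanStep (st : Option String × Bool × Bool × Bool) (item : String) :
    Option String × Bool × Bool × Bool :=
  let p := pvPrefix2 item
  let cg0 : Bool := if st.1 = some p then st.2.1 else false
  let t := lastCh item
  if t = 'G' then (some p, true, true, st.2.2.2)
  else if t = 'M' ∧ cg0 = false then (some p, cg0, st.2.2.1, true)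
  else (some p, cg0, st.2.2.1, st.2.2.2)

def valid_state_b : List (List String) → Bool
  | [] => true
  | floor :: rest =>
      let r := (PySem.List.sorted2 floor pvPrefix2 lastCh).foldl scanStep
        ((none : Option String), false, false, false)
      if r.2.2.1 && r.2.2.2 then false else valid_state_b rest

def get_valid_states_alt (states : List (List (List String))) : List (List (List String)) :=
  states.filter valid_state_b

-- ===== PRECONDITION & SPEC =====
-- Pre_ excludes inputs containing an empty string item, on which Python A (item[-1]) raises IndexError.
def Pre_get_valid_states (states : List (List (List String))) : Prop :=
  (states.all (fun st => st.all (fun fl => fl.all (fun item => !item.toList.isEmpty)))) = true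
instance (states : List (List (List String))) : Decidable (Pre_get_valid_states states) := by
  unfold Pre_get_valid_states; infer_instance

def pvWitness_get_valid_states : List (List (List String)) :=
  [[["HyG", "HyM"], ["LiM"]], [["LiG", "HyM"]]]

def Spec_get_valid_states (states : List (List (List String))) (out : List (List (List String))) : Prop := out = get_valid_states_alt states
instance (states : List (List (List String))) (out : List (List (List String))) : Decidable (Spec_get_valid_states states out) := by unfold Spec_get_valid_states; infer_instance

-- ===== CLAIM (what is proved, stated in full; the proofs are below) =====
def Claim_equal_get_valid_states : Prop := ∀ (states : List (List (List String))), Dom_get_valid_states states → Pre_get_valid_states states → Spec_get_valid_states states (get_valid_states states)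

-- ===== LEMMAS AND PROOFS =====

-- B's sort key, and the order the sorted floor is pairwise in
def pvKey (item : String) : Lex (String × Char) := toLex (pvPrefix2 item, lastCh item)

def keyLe (a b : String) : Prop :=
  pvPrefix2 a < pvPrefix2 b ∨ (pvPrefix2 a = pvPrefix2 b ∧ lastCh a ≤ lastCh b)

-- "g is a generator of the same element as m, somewhere in L" (A's inner scan)
def shieldedIn (L : List String) (m : String) : Bool :=
  L.any (fun g => isG g && (pvPrefix2 m == pvPrefix2 g))

lemma isG_eq_false_of_isM {x : String} (h : isM x = true) : isG x = false := by
  unfold isM isG at *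
  rw [beq_iff_eq] at h
  rw [h]
  decide

lemma isG_eq_lastCh (x : String) : isG x = (lastCh x == 'G') := by
  unfold isG lastCh
  cases h : PySem.Str.pyGet? x (-1) <;> simp

lemma isM_eq_lastCh (x : String) : isM x = (lastCh x == 'M') := by
  unfold isM lastCh
  cases h : PySem.Str.pyGet? x (-1) <;> simp

-- A's accumulation loop partitions the floor into its M-items and its G-items
lemma mg_foldl (floor : List String) (a b : List String) :
    floor.foldl (fun (acc : List String × List String) item =>
        if isM item then (acc.1 ++ [item], acc.2)
        else if isG item then (acc.1, acc.2 ++ [item])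
        else acc) (a, b)
      = (a ++ floor.filter isM, b ++ floor.filter isG) := by
  induction floor generalizing a b with
  | nil => simp
  | cons x xs ih =>
      simp only [List.foldl_cons, List.filter_cons]
      cases hM : isM x
      · cases hG : isG x <;> simp [ih]
      · have hG := isG_eq_false_of_isM hM
        simp [hG, ih]

-- sorted2 with keys k1, k2 is sorted with the lexicographic pair key
lemma before_eq :
    (fun (a b : String) => decide (pvPrefix2 a < pvPrefix2 b) ||
        (!decide (pvPrefix2 b < pvPrefix2 a) && decide (lastCh a < lastCh b)))
      = (fun a b => decide (pvKey a < pvKey b)) := by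
  funext a b
  rw [Bool.eq_iff_iff]
  simp only [pvKey, Bool.or_eq_true, Bool.and_eq_true, Bool.not_eq_true',
    decide_eq_true_eq, decide_eq_false_iff_not, Prod.Lex.lt_iff]
  rcases lt_trichotomy (pvPrefix2 a) (pvPrefix2 b) with h1 | h1 | h1
  · simp [h1, not_lt.mpr (le_of_lt h1)]
  · simp [h1]
  · simp [h1, not_lt.mpr (le_of_lt h1), h1.ne']

lemma sorted2_eq_sorted_lex (xs : List String) :
    PySem.List.sorted2 xs pvPrefix2 lastCh = PySem.List.sorted xs pvKey := by
  unfold PySem.List.sorted2 PySem.List.sorted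
  simp only [Bool.false_eq_true, if_false]
  rw [before_eq]

lemma pairwise_keyLe (xs : List String) :
    (PySem.List.sorted2 xs pvPrefix2 lastCh).Pairwise keyLe := by
  rw [sorted2_eq_sorted_lex]
  refine (PySem.List.sorted_pairwise xs pvKey).imp ?_
  intro a b hab
  unfold pvKey at hab
  rw [Prod.Lex.le_iff] at hab
  exact hab.imp (fun h => h) (fun h => ⟨h.1, h.2⟩)

-- the any_gen flag of the scan accumulates "some generator seen"
lemma scanStep_G {x : String} (hG : lastCh x = 'G') (st : Option String × Bool × Bool × Bool) :
    scanStep st x = (some (pvPrefix2 x), true, true, st.2.2.2) := by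
  simp [scanStep, hG]

lemma scanStep_third {x : String} (hG : lastCh x ≠ 'G') (st : Option String × Bool × Bool × Bool) :
    (scanStep st x).2.2.1 = st.2.2.1 := by
  simp only [scanStep, if_neg hG]
  split <;> split <;> rfl

lemma scan_anyGen (R : List String) (st : Option String × Bool × Bool × Bool) :
    (R.foldl scanStep st).2.2.1 = (st.2.2.1 || R.any isG) := by
  induction R generalizing st with
  | nil => simp
  | cons x rest ih =>
      rw [List.foldl_cons, List.any_cons, isG_eq_lastCh, ih]
      by_cases hG : lastCh x = 'G'
      · rw [scanStep_G hG]
        simp [hG]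
      · rw [scanStep_third hG]
        have : (lastCh x == 'G') = false := by simp [hG]
        rw [this, Bool.false_or]

-- any over a list, with a pointwise-equal-on-members predicate
lemma any_congr_mem {α : Type} {l : List α} {f g : α → Bool}
    (h : ∀ x ∈ l, f x = g x) : l.any f = l.any g := by
  induction l with
  | nil => rfl
  | cons a t ih =>
      rw [List.any_cons, List.any_cons, h a (List.mem_cons_self),
        ih (fun x hx => h x (List.mem_cons_of_mem a hx))]

lemma keyLe_prefix_le {a b : String} (h : keyLe a b) : pvPrefix2 a ≤ pvPrefix2 b :=
  h.elim le_of_lt (fun h' => le_of_eq h'.1)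

-- a generator of the same element never follows a microchip in key order
lemma no_gen_after_chip {x g : String} (hM : lastCh x = 'M') (hk : keyLe x g)
    (hg : isG g = true) : (pvPrefix2 x == pvPrefix2 g) = false := by
  rw [isG_eq_lastCh, beq_iff_eq] at hg
  rcases hk with h | ⟨h1, h2⟩
  · simp [ne_of_lt h]
  · rw [hM, hg] at h2
    exact absurd h2 (by decide)

lemma shieldedIn_cons (y : String) (L : List String) (m : String) :
    shieldedIn (y :: L) m = ((isG y && (pvPrefix2 m == pvPrefix2 y)) || shieldedIn L m) := by
  rw [shieldedIn, List.any_cons]; rfl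

-- the bad flag of the scan over a key-sorted suffix, all of whose prefixes are ≥ c
set_option maxHeartbeats 1000000 in
lemma scan_bad (R : List String) : ∀ (c : String) (cg ag bd : Bool),
    R.Pairwise keyLe → (∀ y ∈ R, c ≤ pvPrefix2 y) →
    (R.foldl scanStep (some c, cg, ag, bd)).2.2.2
      = (bd || R.any (fun m => isM m &&
          !(((pvPrefix2 m == c) && cg) || shieldedIn R m))) := by
  induction R with
  | nil => intros; simp
  | cons x rest ih =>
      intro c cg ag bd hs hc
      obtain ⟨hxr, hs'⟩ := List.pairwise_cons.mp hs
      have hcx : c ≤ pvPrefix2 x := hc x List.mem_cons_self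
      have hrp : ∀ y ∈ rest, pvPrefix2 x ≤ pvPrefix2 y :=
        fun y hy => keyLe_prefix_le (hxr y hy)
      rw [List.foldl_cons, List.any_cons]
      by_cases hG : lastCh x = 'G'
      · -- a generator: cur_gen and any_gen become true
        have hMx : isM x = false := by rw [isM_eq_lastCh, hG]; rfl
        have hGx : isG x = true := by rw [isG_eq_lastCh, hG]; rfl
        rw [scanStep_G hG, ih (pvPrefix2 x) true true bd hs' hrp, hMx]
        simp only [Bool.false_and, Bool.false_or]
        congr 1
        refine any_congr_mem (fun m hm => ?_)
        rw [shieldedIn_cons, hGx, Bool.true_and, Bool.and_true]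
        by_cases hpc : pvPrefix2 m = c
        · have hxm : pvPrefix2 m = pvPrefix2 x :=
            le_antisymm (by rw [hpc]; exact hcx) (hrp m hm)
          have hb : (pvPrefix2 m == pvPrefix2 x) = true := by simp [hxm]
          simp [hb]
        · have hb : (pvPrefix2 m == c) = false := by simp [hpc]
          rw [hb, Bool.false_and, Bool.false_or]
      · have hGx : isG x = false := by rw [isG_eq_lastCh]; simp [hG]
        by_cases hM : lastCh x = 'M'
        · have hMx : isM x = true := by rw [isM_eq_lastCh, hM]; rfl
          by_cases hcg : c = pvPrefix2 x ∧ cg = true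
          · -- shielded chip: flags unchanged
            obtain ⟨hcp, hc2⟩ := hcg
            have hstep : scanStep (some c, cg, ag, bd) x =
                (some (pvPrefix2 x), true, ag, bd) := by
              simp [scanStep, hM, hcp, hc2]
            rw [hstep, ih (pvPrefix2 x) true ag bd hs' hrp]
            have hx0 : (isM x && !(((pvPrefix2 x == c) && cg) || shieldedIn (x :: rest) x)) = false := by
              have hb : (pvPrefix2 x == c) = true := by simp [hcp]
              simp [hb, hc2]
            rw [hx0, Bool.false_or]
            congr 1
            refine any_congr_mem (fun m hm => ?_)
            rw [shieldedIn_cons, hGx, Bool.false_and, Bool.false_or, hcp, hc2, Bool.and_true]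
          · -- unshielded chip: bad is set, and stays set
            have hstep : scanStep (some c, cg, ag, bd) x =
                (some (pvPrefix2 x), false, ag, true) := by
              by_cases hcp : c = pvPrefix2 x
              · have hc2 : cg = false := by
                  cases hcgv : cg
                  · rfl
                  · exact absurd ⟨hcp, hcgv⟩ hcg
                simp [scanStep, hM, hcp, hc2]
              · simp [scanStep, hM, hcp]
            rw [hstep, ih (pvPrefix2 x) false ag true hs' hrp]
            have hx1 : (isM x && !(((pvPrefix2 x == c) && cg) || shieldedIn (x :: rest) x)) = true := by
              have hb : ((pvPrefix2 x == c) && cg) = false := by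
                by_cases hcp : c = pvPrefix2 x
                · have hc2 : cg = false := by
                    cases hcgv : cg
                    · rfl
                    · exact absurd ⟨hcp, hcgv⟩ hcg
                  rw [hc2, Bool.and_false]
                · have : (pvPrefix2 x == c) = false := by
                    rw [beq_eq_false_iff_ne]
                    exact fun h => hcp h.symm
                  rw [this, Bool.false_and]
              rw [hMx, Bool.true_and, hb, Bool.false_or, shieldedIn_cons,
                hGx, Bool.false_and, Bool.false_or, shieldedIn,
                List.any_eq_false.mpr, Bool.not_false]
              intro g hg
              cases hgG : isG g with
              | true =>
                  rw [Bool.true_and, no_gen_after_chip hM (hxr g hg) hgG]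
                  decide
              | false =>
                  rw [Bool.false_and]
                  decide
            rw [hx1]
            simp
        · -- an item that is neither a generator nor a microchip: only cur/cur_gen move
          have hMx : isM x = false := by rw [isM_eq_lastCh]; simp [hM]
          by_cases hcp : c = pvPrefix2 x
          · have hstep : scanStep (some c, cg, ag, bd) x =
                (some (pvPrefix2 x), cg, ag, bd) := by
              simp [scanStep, hG, hM, hcp]
            rw [hstep, ih (pvPrefix2 x) cg ag bd hs' hrp, hMx]
            simp only [Bool.false_and, Bool.false_or]
            congr 1
            refine any_congr_mem (fun m hm => ?_)
            rw [shieldedIn_cons, hGx, Bool.false_and, Bool.false_or, hcp]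
          · have hstep : scanStep (some c, cg, ag, bd) x =
                (some (pvPrefix2 x), false, ag, bd) := by
              simp [scanStep, hG, hM, hcp]
            rw [hstep, ih (pvPrefix2 x) false ag bd hs' hrp, hMx]
            simp only [Bool.false_and, Bool.false_or]
            congr 1
            refine any_congr_mem (fun m hm => ?_)
            rw [shieldedIn_cons, hGx, Bool.false_and, Bool.false_or]
            have hmc : (pvPrefix2 m == c) = false := by
              rw [beq_eq_false_iff_ne]
              intro hh
              have hxc : pvPrefix2 x ≤ c := by rw [← hh]; exact hrp m hm
              exact hcp (le_antisymm hcx hxc)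
            rw [hmc, Bool.and_false, Bool.false_and, Bool.false_or]

-- bad over the whole sorted floor = "some chip with no same-element generator anywhere"
set_option maxHeartbeats 1000000 in
lemma scan_bad_top (S : List String) (hs : S.Pairwise keyLe) :
    (S.foldl scanStep ((none : Option String), false, false, false)).2.2.2
      = S.any (fun m => isM m && !shieldedIn S m) := by
  cases S with
  | nil => rfl
  | cons x rest =>
      obtain ⟨hxr, hs'⟩ := List.pairwise_cons.mp hs
      have hrp : ∀ y ∈ rest, pvPrefix2 x ≤ pvPrefix2 y :=
        fun y hy => keyLe_prefix_le (hxr y hy)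
      rw [List.foldl_cons, List.any_cons]
      by_cases hG : lastCh x = 'G'
      · have hMx : isM x = false := by rw [isM_eq_lastCh, hG]; rfl
        have hGx : isG x = true := by rw [isG_eq_lastCh, hG]; rfl
        rw [scanStep_G hG, scan_bad rest (pvPrefix2 x) true true false hs' hrp, hMx]
        simp only [Bool.false_and, Bool.false_or]
        refine any_congr_mem (fun m hm => ?_)
        rw [shieldedIn_cons, hGx, Bool.true_and, Bool.and_true]
      · have hGx : isG x = false := by rw [isG_eq_lastCh]; simp [hG]
        by_cases hM : lastCh x = 'M'
        · have hMx : isM x = true := by rw [isM_eq_lastCh, hM]; rfl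
          have hstep : scanStep ((none : Option String), false, false, false) x =
              (some (pvPrefix2 x), false, false, true) := by
            simp [scanStep, hM]
          rw [hstep, scan_bad rest (pvPrefix2 x) false false true hs' hrp]
          have hx1 : (isM x && !shieldedIn (x :: rest) x) = true := by
            rw [hMx, Bool.true_and, shieldedIn_cons, hGx, Bool.false_and, Bool.false_or,
              shieldedIn, List.any_eq_false.mpr, Bool.not_false]
            intro g hg
            cases hgG : isG g with
            | true =>
                rw [Bool.true_and, no_gen_after_chip hM (hxr g hg) hgG]
                decide
            | false =>
                rw [Bool.false_and]
                decide
          rw [hx1]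
          simp
        · have hMx : isM x = false := by rw [isM_eq_lastCh]; simp [hM]
          have hstep : scanStep ((none : Option String), false, false, false) x =
              (some (pvPrefix2 x), false, false, false) := by
            simp [scanStep, hG, hM]
          rw [hstep, scan_bad rest (pvPrefix2 x) false false false hs' hrp, hMx]
          simp only [Bool.false_and, Bool.false_or]
          refine any_congr_mem (fun m hm => ?_)
          simp only [shieldedIn_cons, hGx, Bool.false_and, Bool.false_or, Bool.and_false]

-- per floor, A's check and B's scan agree
lemma valid_state_b_cons (floor : List String) (rest : List (List String)) :
    valid_state_b (floor :: rest)
      = (if ((PySem.List.sorted2 floor pvPrefix2 lastCh).foldl scanStep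
            ((none : Option String), false, false, false)).2.2.1
          && ((PySem.List.sorted2 floor pvPrefix2 lastCh).foldl scanStep
            ((none : Option String), false, false, false)).2.2.2
        then false else valid_state_b rest) := rfl

lemma valid_state_eq (state : List (List String)) :
    valid_state_a state = valid_state_b state := by
  induction state with
  | nil => rfl
  | cons floor rest ih =>
      rw [valid_state_a]
      simp only [mg_foldl, List.nil_append]
      have hperm := PySem.List.sorted2_perm floor pvPrefix2 lastCh false
      have hAG : ((PySem.List.sorted2 floor pvPrefix2 lastCh).foldl scanStep
          ((none : Option String), false, false, false)).2.2.1 = floor.any isG := by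
        rw [scan_anyGen, Bool.false_or, hperm.any_eq]
      have hBD : ((PySem.List.sorted2 floor pvPrefix2 lastCh).foldl scanStep
          ((none : Option String), false, false, false)).2.2.2
          = floor.any (fun m => isM m && !shieldedIn floor m) := by
        rw [scan_bad_top _ (pairwise_keyLe floor)]
        rw [any_congr_mem (l := PySem.List.sorted2 floor pvPrefix2 lastCh)
          (g := fun m => isM m && !shieldedIn floor m)
          (fun m _ => by rw [show shieldedIn (PySem.List.sorted2 floor pvPrefix2 lastCh) m
            = shieldedIn floor m from hperm.any_eq])]
        exact hperm.any_eq
      rw [valid_state_b_cons, hAG, hBD]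
      cases hany : floor.any isG with
      | false =>
          have hfil : floor.filter isG = [] := by
            rw [List.filter_eq_nil_iff]
            intro g hg
            have := (List.any_eq_false.mp hany) g hg
            simp [this]
          rw [hfil]
          simp [ih]
      | true =>
          obtain ⟨g, hg, hgt⟩ := List.any_eq_true.mp hany
          have hfil : (floor.filter isG).length > 0 :=
            List.length_pos_iff.mpr (List.ne_nil_of_mem (List.mem_filter.mpr ⟨hg, hgt⟩))
          rw [if_pos hfil]
          have hall : ((floor.filter isM).all
                (fun m => (floor.filter isG).any (fun g => pvPrefix2 m == pvPrefix2 g)))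
              = !(floor.any (fun m => isM m && !shieldedIn floor m)) := by
            rw [List.all_filter, List.all_eq_not_any_not]
            congr 1
            refine any_congr_mem (fun m hm => ?_)
            rw [List.any_filter]
            simp [shieldedIn, Bool.not_or]
          rw [hall]
          cases hbd2 : floor.any (fun m => isM m && !shieldedIn floor m) <;> simp [ih]

-- the while/del loop keeps exactly the valid states, in order
lemma gvs_loop_eq (kept rem : List (List (List String))) :
    gvs_loop kept rem = kept ++ rem.filter valid_state_a := by
  induction rem generalizing kept with
  | nil => simp [gvs_loop]
  | cons s rest ih =>
      rw [gvs_loop, List.filter_cons]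
      by_cases hv : valid_state_a s = true
      · simp [hv, ih]
      · simp [Bool.eq_false_iff.mpr hv, ih]

-- ===== VERDICT (by name: the statement is the Claim_ definition above) =====
theorem get_valid_states_spec : Claim_equal_get_valid_states := by
  intro states _ _
  unfold Spec_get_valid_states get_valid_states get_valid_states_alt
  rw [gvs_loop_eq, List.nil_append]
  exact List.filter_congr (fun s _ => valid_state_eq s)
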